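-- pv_equiv track=rewrite | github.com/fu-group/fu | src/lib.py | Ary1DTo2D
-- ===== SOURCE A (Python) =====
-- import copy
--
-- def Ary1DTo2D(n,a):
--     """ Convert linear to square array
--
--     :param int n: array size
--     :param lst a: linear array
--     :return: a2d - square array
--     """
--     a2d=[]; a1=n*[0]
--     for i in range(n): a2d.append(copy.deepcopy(a1))
--     k = -1
--     for i in range(n):
--         for j in range(i+1):
--             k += 1
--             a2d[j][i]=a[k]; a2d[i][j]=a[k]
--     return a2d
-- ===== SOURCE B (Python) =====
-- def Ary1DTo2D(n, a):
--     """Convert linear to square array: each cell (r,c) reads its value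
--     directly from the packed lower triangle via a closed-form index."""
--     return [[a[(max(r, c) * (max(r, c) + 1)) // 2 + min(r, c)] for c in range(n)]
--             for r in range(n)]
-- ===== Notes on version B (the rewrite author's own statement) =====
-- stated objective: alternative
-- what changed: Replaces the incrementing-counter triangular fill (deepcopy'd zero rows, two symmetric writes per step) with a single nested comprehension that computes each cell's packed-triangle source index in closed form.
import Mathlib
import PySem

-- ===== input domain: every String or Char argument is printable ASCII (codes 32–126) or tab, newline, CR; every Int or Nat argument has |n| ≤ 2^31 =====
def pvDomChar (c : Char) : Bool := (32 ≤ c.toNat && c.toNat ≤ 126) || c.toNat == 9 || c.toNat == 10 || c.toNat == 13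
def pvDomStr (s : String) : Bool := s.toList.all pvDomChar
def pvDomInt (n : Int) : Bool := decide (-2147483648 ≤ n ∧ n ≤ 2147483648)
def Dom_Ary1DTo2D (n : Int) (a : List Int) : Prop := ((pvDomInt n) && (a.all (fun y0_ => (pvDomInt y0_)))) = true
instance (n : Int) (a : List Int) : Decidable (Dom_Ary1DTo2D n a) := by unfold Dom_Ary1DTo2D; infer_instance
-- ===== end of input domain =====

-- B replaces A's incrementing-counter triangular fill with a nested comprehension
-- computing each cell's packed-triangle source index in closed form (objective: alternative).

-- ===== PORT A =====
-- one inner-loop body step of A: k += 1; a2d[j][i] = a[k]; a2d[i][j] = a[k]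
-- (a[k] is in range on every admitted input; the .getD 0 fallback is never reached under Pre_)
def pvStepA (a : List Int) (i : Int) (st : List (List Int) × Int) (j : Int) :
    List (List Int) × Int :=
  let k := st.2 + 1
  let v := (PySem.List.pyGet? a k).getD 0
  let m := st.1.set j.toNat ((st.1.getD j.toNat []).set i.toNat v)
  let m := m.set i.toNat ((m.getD i.toNat []).set j.toNat v)
  (m, k)

def Ary1DTo2D (n : Int) (a : List Int) : List (List Int) :=
  -- a1 = n*[0]; for i in range(n): a2d.append(copy.deepcopy(a1));
  -- k = -1; for i in range(n): for j in range(i+1): <pvStepA>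
  ((PySem.List.pyRange 0 n 1).foldl
      (fun st i => (PySem.List.pyRange 0 (i + 1) 1).foldl (pvStepA a i) st)
      ((PySem.List.pyRange 0 n 1).foldl
        (fun acc _ => acc ++ [List.replicate n.toNat 0]) [], -1)).1

-- ===== PORT B =====
def Ary1DTo2D_alt (n : Int) (a : List Int) : List (List Int) :=
  (PySem.List.pyRange 0 n 1).map (fun r =>
    (PySem.List.pyRange 0 n 1).map (fun c =>
      (PySem.List.pyGet? a
        (PySem.Int.floordiv (max r c * (max r c + 1)) 2 + min r c)).getD 0))

-- ===== PRECONDITION & SPEC =====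
-- Pre_ excludes exactly the inputs on which Python A raises IndexError:
-- a positive n with the flat array shorter than the packed triangle n*(n+1)/2.
def Pre_Ary1DTo2D (n : Int) (a : List Int) : Prop := n ≤ 0 ∨ n * (n + 1) ≤ 2 * a.length
instance (n : Int) (a : List Int) : Decidable (Pre_Ary1DTo2D n a) := by
  unfold Pre_Ary1DTo2D; infer_instance

def pvWitness_Ary1DTo2D : Int × List Int := (2, [1, 2, 3])

def Spec_Ary1DTo2D (n : Int) (a : List Int) (out : List (List Int)) : Prop := out = Ary1DTo2D_alt n a
instance (n : Int) (a : List Int) (out : List (List Int)) : Decidable (Spec_Ary1DTo2D n a out) := by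
  unfold Spec_Ary1DTo2D; infer_instance

-- ===== CLAIM (what is proved, stated in full; the proofs are below) =====
def Claim_equal_Ary1DTo2D : Prop := ∀ (n : Int) (a : List Int), Dom_Ary1DTo2D n a → Pre_Ary1DTo2D n a → Spec_Ary1DTo2D n a (Ary1DTo2D n a)

-- ===== LEMMAS AND PROOFS =====

-- the N×N matrix with entries g r c
def pvMk (N : Nat) (g : Nat → Nat → Int) : List (List Int) :=
  (List.range N).map (fun r => (List.range N).map (fun c => g r c))

-- triangular numbers, recursively (pvTri m = m*(m+1)/2)
def pvTri : Nat → Nat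
  | 0 => 0
  | m + 1 => pvTri m + m + 1

-- the value both programs place at cell (r, c)
def pvF (a : List Int) (r c : Nat) : Int := a.getD (pvTri (max r c) + min r c) 0

lemma pvTri_eq (m : Nat) : pvTri m = m * (m + 1) / 2 := by
  induction m with
  | zero => rfl
  | succ m ih =>
    have h : (m + 1) * (m + 2) = m * (m + 1) + (m + 1) * 2 := by ring
    simp only [pvTri, ih, h, Nat.add_mul_div_right _ _ (by norm_num : (0:Nat) < 2)]
    omega

lemma pvF_comm (a : List Int) (r c : Nat) : pvF a r c = pvF a c r := by
  simp [pvF, Nat.max_comm, Nat.min_comm]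

lemma pvMk_congr (N : Nat) (g g' : Nat → Nat → Int)
    (h : ∀ r < N, ∀ c < N, g r c = g' r c) : pvMk N g = pvMk N g' := by
  apply List.ext_getElem <;> simp [pvMk]
  intro r hr c hc
  exact h r hr c hc

lemma pvMk_getD (N : Nat) (g : Nat → Nat → Int) (r : Nat) (hr : r < N) :
    (pvMk N g).getD r [] = (List.range N).map (fun c => g r c) := by
  simp [pvMk, List.getD, hr]

lemma pvMk_set (N : Nat) (g : Nat → Nat → Int) (r c : Nat) (hr : r < N) (_hc : c < N) (v : Int) :
    (pvMk N g).set r (((pvMk N g).getD r []).set c v)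
      = pvMk N (fun r' c' => if r' = r ∧ c' = c then v else g r' c') := by
  rw [pvMk_getD N g r hr]
  apply List.ext_getElem
  · simp [pvMk]
  · intro i hi hi'
    simp only [pvMk] at hi hi' ⊢
    rw [List.getElem_set]
    by_cases h : r = i
    · subst h
      rw [if_pos rfl]
      simp only [List.getElem_map, List.getElem_range]
      apply List.ext_getElem
      · simp
      · intro jj hj hj'
        rw [List.getElem_set]
        simp only [List.getElem_map, List.getElem_range]
        by_cases h2 : c = jj
        · subst h2
          rw [if_pos rfl, if_pos (by simp)]
        · rw [if_neg h2, if_neg (fun hx => h2 hx.2.symm)]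
    · rw [if_neg h]
      simp only [List.getElem_map, List.getElem_range]
      apply List.ext_getElem
      · simp
      · intro jj hj hj'
        simp only [List.getElem_map, List.getElem_range]
        rw [if_neg (fun hx => h hx.1.symm)]

lemma pvGetD_cast (a : List Int) (t : Nat) :
    (PySem.List.pyGet? a (t : Int)).getD 0 = a.getD t 0 := by
  simp [PySem.List.pyGet?_natCast, List.getD]

-- the inner loop: for j in range(i+1), first t iterations
lemma pvInner (a : List Int) (N it : Nat) (hN : it < N) (g : Nat → Nat → Int)
    (t : Nat) (ht : t ≤ it + 1) :
    (List.range t).foldl (fun st (jn : Nat) => pvStepA a (it : Int) st (jn : Int))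
        (pvMk N g, ((pvTri it : Nat) : Int) - 1)
      = (pvMk N (fun r c => if (c = it ∧ r < t) ∨ (r = it ∧ c < t) then pvF a r c else g r c),
         ((pvTri it : Nat) : Int) - 1 + t) := by
  induction t with
  | zero =>
    simp only [List.range_zero, List.foldl_nil, Nat.cast_zero, add_zero]
    rw [Prod.mk.injEq]
    refine ⟨?_, rfl⟩
    apply pvMk_congr
    intro r _ c _
    simp
  | succ t ih =>
    have ht' : t ≤ it + 1 := by omega
    rw [List.range_succ, List.foldl_append, ih ht', List.foldl_cons, List.foldl_nil]
    have htle : t ≤ it := by omega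
    have htN : t < N := by omega
    simp only [pvStepA]
    have hk : ((pvTri it : Nat) : Int) - 1 + (t : Int) + 1 = ((pvTri it + t : Nat) : Int) := by
      push_cast; ring
    have hv : (PySem.List.pyGet? a ((pvTri it + t : Nat) : Int)).getD 0 = pvF a t it := by
      rw [pvGetD_cast]
      simp [pvF, Nat.max_eq_right htle, Nat.min_eq_left htle]
    rw [hk, hv]
    have hjt : ((t : Int)).toNat = t := by simp
    have hit : ((it : Int)).toNat = it := by simp
    rw [hjt, hit, pvMk_set N _ t it htN hN, pvMk_set N _ it t hN htN, Prod.mk.injEq]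
    refine ⟨?_, by push_cast; ring⟩
    apply pvMk_congr
    intro r hr c hc
    by_cases h1 : r = it ∧ c = t
    · obtain ⟨h1a, h1b⟩ := h1; subst h1a; subst h1b
      rw [if_pos ⟨rfl, rfl⟩, if_pos (Or.inr ⟨rfl, by omega⟩), pvF_comm]
    · rw [if_neg h1]
      by_cases h2 : r = t ∧ c = it
      · obtain ⟨h2a, h2b⟩ := h2; subst h2a; subst h2b
        rw [if_pos ⟨rfl, rfl⟩, if_pos (Or.inl ⟨rfl, by omega⟩)]
      · rw [if_neg h2]
        by_cases h3 : (c = it ∧ r < t) ∨ (r = it ∧ c < t)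
        · rw [if_pos h3, if_pos (by omega)]
        · rw [if_neg h3, if_neg (by omega)]

-- the outer loop: for i in range(n), first u iterations
lemma pvOuter (a : List Int) (N : Nat) (u : Nat) (hu : u ≤ N) :
    (List.range u).foldl
        (fun st (inat : Nat) =>
          (PySem.List.pyRange 0 ((inat : Int) + 1) 1).foldl (pvStepA a (inat : Int)) st)
        (pvMk N (fun _ _ => 0), -1)
      = (pvMk N (fun r c => if max r c < u then pvF a r c else 0),
         ((pvTri u : Nat) : Int) - 1) := by
  induction u with
  | zero =>
    simp only [List.range_zero, List.foldl_nil, pvTri, Nat.cast_zero]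
    rw [Prod.mk.injEq]
    refine ⟨?_, by norm_num⟩
    apply pvMk_congr
    intro r _ c _
    simp
  | succ u ih =>
    have hu' : u ≤ N := by omega
    have huN : u < N := by omega
    rw [List.range_succ, List.foldl_append, ih hu', List.foldl_cons, List.foldl_nil]
    have hrange : PySem.List.pyRange 0 ((u : Int) + 1) 1
        = (List.range (u + 1)).map (fun k : Nat => (k : Int)) := by
      rw [PySem.List.pyRange_one]
      have h1 : (((u : Int) + 1) - 0).toNat = u + 1 := by omega
      rw [h1]
      simp only [zero_add]
    rw [hrange, List.foldl_map, pvInner a N u huN _ (u + 1) (le_refl _), Prod.mk.injEq]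
    refine ⟨?_, by simp only [pvTri]; push_cast; ring⟩
    apply pvMk_congr
    intro r hr c hc
    by_cases h1 : (c = u ∧ r < u + 1) ∨ (r = u ∧ c < u + 1)
    · rw [if_pos h1, if_pos (by omega)]
    · rw [if_neg h1]
      by_cases h2 : max r c < u
      · rw [if_pos h2, if_pos (by omega)]
      · rw [if_neg h2, if_neg (by omega)]

-- the initial zero matrix
lemma pvFoldAppend {α : Type} (l : List Int) (x : α) (init : List α) :
    l.foldl (fun acc _ => acc ++ [x]) init = init ++ List.replicate l.length x := by
  induction l generalizing init with
  | nil => simp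
  | cons h t ih => simp [ih, List.replicate_succ]

lemma pvInit (n : Int) : (PySem.List.pyRange 0 n 1).foldl
      (fun acc _ => acc ++ [List.replicate n.toNat 0]) []
    = pvMk n.toNat (fun _ _ => 0) := by
  rw [pvFoldAppend]
  apply List.ext_getElem
  · simp [pvMk, PySem.List.length_pyRange_one]
  · intro i hi hi'
    simp only [List.nil_append, List.getElem_replicate, pvMk, List.getElem_map]
    apply List.ext_getElem <;> simp

lemma pvA_eq (n : Int) (a : List Int) : Ary1DTo2D n a = pvMk n.toNat (pvF a) := by
  unfold Ary1DTo2D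
  rw [pvInit]
  have hrange : PySem.List.pyRange 0 n 1 = (List.range n.toNat).map (fun k : Nat => (k : Int)) := by
    rw [PySem.List.pyRange_one]
    have h1 : (n - 0).toNat = n.toNat := by omega
    rw [h1]
    simp only [zero_add]
  rw [hrange, List.foldl_map, pvOuter a n.toNat n.toNat (le_refl _)]
  apply pvMk_congr
  intro r hr c hc
  rw [if_pos (by omega)]

lemma pvB_eq (n : Int) (a : List Int) : Ary1DTo2D_alt n a = pvMk n.toNat (pvF a) := by
  unfold Ary1DTo2D_alt pvMk
  have hrange : PySem.List.pyRange 0 n 1 = (List.range n.toNat).map (fun k : Nat => (k : Int)) := by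
    rw [PySem.List.pyRange_one]
    have h1 : (n - 0).toNat = n.toNat := by omega
    rw [h1]
    simp only [zero_add]
  rw [hrange]
  simp only [List.map_map]
  apply List.map_congr_left
  intro r _
  simp only [Function.comp_apply]
  apply List.map_congr_left
  intro c _
  simp only [Function.comp_apply]
  have hmax : max ((r : Nat) : Int) ((c : Nat) : Int) = ((max r c : Nat) : Int) := by
    exact_mod_cast (Nat.cast_max r c).symm
  have hmin : min ((r : Nat) : Int) ((c : Nat) : Int) = ((min r c : Nat) : Int) := by
    exact_mod_cast (Nat.cast_min r c).symm
  rw [hmax, hmin]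
  have hfd : PySem.Int.floordiv (((max r c : Nat) : Int) * (((max r c : Nat) : Int) + 1)) 2
      = ((max r c * (max r c + 1) / 2 : Nat) : Int) := by
    rw [PySem.Int.floordiv_eq_ediv_of_pos (by norm_num)]
    push_cast
    exact_mod_cast (Int.natCast_div (max r c * (max r c + 1)) 2).symm
  rw [hfd]
  have hsum : ((max r c * (max r c + 1) / 2 : Nat) : Int) + ((min r c : Nat) : Int)
      = ((max r c * (max r c + 1) / 2 + min r c : Nat) : Int) := by push_cast; ring
  rw [hsum, pvGetD_cast]
  simp [pvF, pvTri_eq]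

-- ===== VERDICT (by name: the statement is the Claim_ definition above) =====
theorem Ary1DTo2D_spec : Claim_equal_Ary1DTo2D := by
  intro n a _ _
  unfold Spec_Ary1DTo2D
  rw [pvA_eq, pvB_eq]
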